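-- pv_equiv track=rewrite | github.com/HimanshuLadva/Python-DSA | Leetcode/daily/202511/20251115.py | numberOfSubstringsV2
-- ===== SOURCE A (Python) =====
-- def numberOfSubstringsV2(s: str) -> int:
--     n = len(s)
--     pre = [-1] * (n + 1)
--     for i in range(n):
--         if i == 0 or s[i - 1] == "0":
--             pre[i + 1] = i
--         else:
--             pre[i + 1] = pre[i]
--
--     res = 0
--     for i in range(1, n + 1):
--         cnt0 = 1 if s[i - 1] == "0" else 0
--         j = i
--         while j > 0 and cnt0 * cnt0 <= n:
--             cnt1 = (i - pre[j]) - cnt0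
--             if cnt0 * cnt0 <= cnt1:
--                 res += min(j - pre[j], cnt1 - cnt0 * cnt0 + 1)
--             j = pre[j]
--             cnt0 += 1
--     return res
-- ===== SOURCE B (Python) =====
-- def numberOfSubstringsV2(s: str) -> int:
--     n = len(s)
--     res = 0
--     for r in range(n):
--         z = 0
--         for l in range(r, -1, -1):
--             if s[l] == "0":
--                 z += 1
--             if z * z <= (r - l + 1) - z:
--                 res += 1
--     return res
-- ===== Notes on version B (the rewrite author's own statement) =====
-- stated objective: simpler
-- what changed: Replaced A's prev-zero pointer array and per-endpoint block-chain walk with closed-form block counting by a plain two-loop scan that, for each right endpoint, extends the left endpoint and tests zeros^2 <= ones directly.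
import Mathlib
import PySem

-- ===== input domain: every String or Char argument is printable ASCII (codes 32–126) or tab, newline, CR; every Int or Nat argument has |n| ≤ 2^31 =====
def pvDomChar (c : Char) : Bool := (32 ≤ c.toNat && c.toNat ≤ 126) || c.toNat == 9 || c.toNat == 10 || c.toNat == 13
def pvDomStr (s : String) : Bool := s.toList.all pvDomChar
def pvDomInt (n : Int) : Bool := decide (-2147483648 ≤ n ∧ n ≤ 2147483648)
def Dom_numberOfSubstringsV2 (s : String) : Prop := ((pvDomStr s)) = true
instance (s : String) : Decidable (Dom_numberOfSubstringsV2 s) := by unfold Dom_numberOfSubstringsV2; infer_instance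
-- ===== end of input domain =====

-- B replaces A's prev-zero pointer array and block-chain walk by a plain two-loop scan
-- (for each right endpoint extend the left endpoint, testing zeros² ≤ ones directly): simpler, not faster.

-- ===== PORT A =====
-- pre[-1]*(n+1) then pre[i+1] := i or pre[i]; indices are the nonnegative i of range(n), so List.set/getD are exact here.
def pvPreA (cs : List Char) : List Int :=
  (List.range cs.length).foldl
    (fun pre i =>
      if i = 0 ∨ cs.getD (i - 1) ' ' = '0' then pre.set (i + 1) (i : Int)
      else pre.set (i + 1) (pre.getD i (-1)))
    (List.replicate (cs.length + 1) (-1))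

-- the 'while j > 0 and cnt0*cnt0 <= n' loop; fuel only makes it total (each pass strictly decreases j,
-- so fuel = i suffices and the guard re-checks j > 0; no value changes).
def pvWhileA (nn : Int) (pre : List Int) (i : Int) : Nat → Int → Int → Int → Int
  | 0, _, _, res => res
  | fuel + 1, j, cnt0, res =>
      if 0 < j ∧ cnt0 * cnt0 ≤ nn then
        let p := PySem.List.pyGetD pre j (-1)
        let cnt1 := (i - p) - cnt0
        let res' := if cnt0 * cnt0 ≤ cnt1 then res + min (j - p) (cnt1 - cnt0 * cnt0 + 1) else res
        pvWhileA nn pre i fuel p (cnt0 + 1) res'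
      else res

def numberOfSubstringsV2 (s : String) : Int :=
  let cs := s.toList
  let n := cs.length
  let pre := pvPreA cs
  (PySem.List.pyRange 1 ((n : Int) + 1) 1).foldl
    (fun res i =>
      let cnt0 : Int := if PySem.List.pyGetD cs (i - 1) ' ' = '0' then 1 else 0
      pvWhileA (n : Int) pre i i.toNat i cnt0 res)
    0

-- ===== PORT B =====
def numberOfSubstringsV2_alt (s : String) : Int :=
  let cs := s.toList
  let n := cs.length
  (PySem.List.pyRange 0 (n : Int) 1).foldl
    (fun res r =>
      ((PySem.List.pyRange r (-1) (-1)).foldl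
        (fun (st : Int × Int) l =>
          let z := if PySem.List.pyGetD cs l ' ' = '0' then st.1 + 1 else st.1
          if z * z ≤ (r - l + 1) - z then (z, st.2 + 1) else (z, st.2))
        (0, res)).2)
    0

-- ===== PRECONDITION & SPEC =====
def Spec_numberOfSubstringsV2 (s : String) (out : Int) : Prop := out = numberOfSubstringsV2_alt s
instance (s : String) (out : Int) : Decidable (Spec_numberOfSubstringsV2 s out) := by unfold Spec_numberOfSubstringsV2; infer_instance

-- ===== CLAIM (what is proved, stated in full; the proofs are below) =====
def Claim_equal_numberOfSubstringsV2 : Prop := ∀ (s : String), Dom_numberOfSubstringsV2 s → Spec_numberOfSubstringsV2 s (numberOfSubstringsV2 s)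

-- ===== LEMMAS AND PROOFS =====

-- number of '0's among positions [a, r] of cs
def pvZc (cs : List Char) (r : Nat) (a : Nat) : Nat :=
  if _h : a ≤ r then (if cs.getD a ' ' = '0' then 1 else 0) + pvZc cs r (a + 1) else 0
termination_by r + 1 - a

-- substring [a, r] is counted: zeros² + zeros ≤ length
def pvVB (cs : List Char) (r a : Nat) : Bool :=
  pvZc cs r a * pvZc cs r a + pvZc cs r a ≤ r + 1 - a

-- per-right-endpoint count of valid left endpoints
def pvC (cs : List Char) (r : Nat) : Nat :=
  (List.range (r + 1)).countP (fun a => pvVB cs r a)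

-- spec version of the pre array: pvPf cs j = pre[j] for 1 ≤ j ≤ n
def pvPf (cs : List Char) : Nat → Nat
  | 0 => 0
  | j + 1 => if j = 0 ∨ cs.getD (j - 1) ' ' = '0' then j else pvPf cs j

lemma pvZc_stop (cs : List Char) (r a : Nat) (h : r < a) : pvZc cs r a = 0 := by
  unfold pvZc; simp [Nat.not_le.mpr h]

lemma pvZc_succ (cs : List Char) (r a : Nat) (h : a ≤ r) :
    pvZc cs r a = (if cs.getD a ' ' = '0' then 1 else 0) + pvZc cs r (a + 1) := by
  conv_lhs => unfold pvZc
  simp [h]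

lemma pvZc_le (cs : List Char) (r a : Nat) : pvZc cs r a ≤ r + 1 - a := by
  by_cases h : a ≤ r
  · rw [pvZc_succ cs r a h]
    have := pvZc_le cs r (a + 1)
    split <;> omega
  · rw [pvZc_stop cs r a (by omega)]; omega
termination_by r + 1 - a

lemma pvZc_anti_succ (cs : List Char) (r a : Nat) : pvZc cs r (a + 1) ≤ pvZc cs r a := by
  by_cases h : a ≤ r
  · rw [pvZc_succ cs r a h]; split <;> omega
  · rw [pvZc_stop cs r a (by omega), pvZc_stop cs r (a + 1) (by omega)]

lemma pvZc_anti (cs : List Char) (r a b : Nat) (hab : a ≤ b) :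
    pvZc cs r b ≤ pvZc cs r a := by
  induction b, hab using Nat.le_induction with
  | base => exact le_refl _
  | succ m hm ih => exact le_trans (pvZc_anti_succ cs r m) ih

lemma pvZc_const (cs : List Char) (r : Nat) :
    ∀ d a, (∀ q, a ≤ q → q < a + d → cs.getD q ' ' ≠ '0') → a + d ≤ r + 1 →
      pvZc cs r a = pvZc cs r (a + d) := by
  intro d
  induction d with
  | zero => intro a _ _; rfl
  | succ m ih =>
      intro a hq hle
      have ha : a ≤ r := by omega
      have hne : cs.getD a ' ' ≠ '0' := hq a le_rfl (by omega)
      rw [pvZc_succ cs r a ha, if_neg hne, Nat.zero_add]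
      rw [ih (a + 1) (fun q h1 h2 => hq q (by omega) (by omega)) (by omega)]
      congr 1
      omega

-- pvPf facts
lemma pvPf_le (cs : List Char) (j : Nat) : pvPf cs (j + 1) ≤ j := by
  induction j with
  | zero => simp [pvPf]
  | succ m ih =>
      show pvPf cs (m + 1 + 1) ≤ m + 1
      unfold pvPf
      split
      · omega
      · omega

lemma pvPf_block (cs : List Char) (j : Nat) :
    ∀ q, pvPf cs (j + 1) ≤ q → q < j → cs.getD q ' ' ≠ '0' := by
  induction j with
  | zero => intro q _ h; omega
  | succ m ih =>
      intro q hq hlt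
      unfold pvPf at hq
      split at hq
      · omega
      · rename_i hcond
        rcases Nat.lt_or_ge q m with h | h
        · exact ih q hq h
        · have hqm : q = m := by omega
          subst hqm
          exact fun hc => hcond (Or.inr hc)

lemma pvPf_zero_char (cs : List Char) (j : Nat) :
    pvPf cs (j + 1) = 0 ∨ cs.getD (pvPf cs (j + 1) - 1) ' ' = '0' := by
  induction j with
  | zero => left; simp [pvPf]
  | succ m ih =>
      unfold pvPf
      split
      · rename_i hcond
        rcases hcond with h | h
        · omega
        · right; simpa using h
      · exact ih

-- pre array characterization: the fold prefix
def pvFoldPre (cs : List Char) (m : Nat) : List Int :=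
  (List.range m).foldl
    (fun pre i =>
      if i = 0 ∨ cs.getD (i - 1) ' ' = '0' then pre.set (i + 1) (i : Int)
      else pre.set (i + 1) (pre.getD i (-1)))
    (List.replicate (cs.length + 1) (-1))

lemma pvSet_getD (L : List Int) (i j : Nat) (v : Int) (hi : i < L.length) :
    (L.set i v).getD j (-1) = if j = i then v else L.getD j (-1) := by
  by_cases hji : j = i
  · subst hji; simp [List.getD_eq_getElem?_getD, hi]
  · rw [if_neg hji]
    simp only [List.getD_eq_getElem?_getD]
    rw [List.getElem?_set_ne (fun h => hji h.symm)]

lemma pvFoldPre_spec (cs : List Char) :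
    ∀ m, m ≤ cs.length →
      (pvFoldPre cs m).length = cs.length + 1 ∧
      ∀ j, j ≤ cs.length →
        (pvFoldPre cs m).getD j (-1) = if 1 ≤ j ∧ j ≤ m then (pvPf cs j : Int) else -1 := by
  intro m
  induction m with
  | zero =>
      intro _
      refine ⟨by simp [pvFoldPre], ?_⟩
      intro j _
      have h1 : (pvFoldPre cs 0).getD j (-1) = -1 := by
        unfold pvFoldPre
        simp only [List.range_zero, List.foldl_nil, List.getD_eq_getElem?_getD,
          List.getElem?_replicate]
        split_ifs <;> rfl
      rw [h1, if_neg (by omega)]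
  | succ m ih =>
      intro hm1
      obtain ⟨hlen, hj⟩ := ih (by omega)
      have hstep : pvFoldPre cs (m + 1)
          = (if m = 0 ∨ cs.getD (m - 1) ' ' = '0' then (pvFoldPre cs m).set (m + 1) (m : Int)
             else (pvFoldPre cs m).set (m + 1) ((pvFoldPre cs m).getD m (-1))) := by
        unfold pvFoldPre
        rw [List.range_succ, List.foldl_append]
        rfl
      have hmlt : m + 1 < (pvFoldPre cs m).length := by omega
      have hpf : pvPf cs (m + 1)
          = if m = 0 ∨ cs.getD (m - 1) ' ' = '0' then (m : Nat) else pvPf cs m := by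
        simp only [pvPf]
      refine ⟨by rw [hstep]; split_ifs <;> simp [hlen], ?_⟩
      intro j hjn
      rw [hstep]
      by_cases hcond : m = 0 ∨ cs.getD (m - 1) ' ' = '0'
      · rw [if_pos hcond, pvSet_getD _ _ _ _ hmlt]
        by_cases hjm : j = m + 1
        · subst hjm
          rw [if_pos rfl, if_pos (show 1 ≤ m + 1 ∧ m + 1 ≤ m + 1 by omega), hpf, if_pos hcond]
        · rw [if_neg hjm, hj j hjn]
          by_cases h2 : 1 ≤ j ∧ j ≤ m
          · rw [if_pos h2, if_pos (by omega)]
          · rw [if_neg h2, if_neg (by omega)]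
      · rw [if_neg hcond, pvSet_getD _ _ _ _ hmlt]
        by_cases hjm : j = m + 1
        · subst hjm
          rw [if_pos rfl, if_pos (show 1 ≤ m + 1 ∧ m + 1 ≤ m + 1 by omega)]
          have hm0 : 1 ≤ m := by
            rcases Nat.eq_zero_or_pos m with h | h
            · exact absurd (Or.inl h) hcond
            · exact h
          rw [hj m (by omega), if_pos (show 1 ≤ m ∧ m ≤ m by omega), hpf, if_neg hcond]
        · rw [if_neg hjm, hj j hjn]
          by_cases h2 : 1 ≤ j ∧ j ≤ m
          · rw [if_pos h2, if_pos (by omega)]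
          · rw [if_neg h2, if_neg (by omega)]

lemma pvPreA_spec (cs : List Char) :
    (pvPreA cs).length = cs.length + 1 ∧
    ∀ j, 1 ≤ j → j ≤ cs.length → (pvPreA cs).getD j (-1) = (pvPf cs j : Int) := by
  have h := pvFoldPre_spec cs cs.length (le_refl _)
  have heq : pvPreA cs = pvFoldPre cs cs.length := rfl
  refine ⟨by rw [heq]; exact h.1, ?_⟩
  intro j h1 h2
  rw [heq, h.2 j h2, if_pos ⟨h1, h2⟩]

-- counting in a left-closed range
lemma pvCountRangeLt (m T : Nat) :
    (List.range m).countP (fun k => decide (k < T)) = min m T := by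
  induction m with
  | zero => simp
  | succ p ih =>
      rw [List.range_succ, List.countP_append, ih]
      by_cases h : p < T <;> simp [h] <;> omega

-- the boolean test as the Int comparison the ports make
lemma pvVB_int (cs : List Char) (r a : Nat) (ha : a ≤ r) :
    pvVB cs r a
      = decide ((pvZc cs r a : Int) * (pvZc cs r a) ≤ ((r : Int) - (a : Int) + 1) - (pvZc cs r a)) := by
  unfold pvVB
  rw [decide_eq_decide]
  rw [show ((pvZc cs r a : Int) * (pvZc cs r a)) = ((pvZc cs r a * pvZc cs r a : Nat) : Int) by
    push_cast; ring]
  generalize pvZc cs r a * pvZc cs r a = w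
  generalize pvZc cs r a = z
  omega

-- the chain lemma: A's while loop counts valid left endpoints below j
lemma pvChain (cs : List Char) (r : Nat) (hr : r < cs.length) :
    ∀ fuel (j c : Nat) (res : Int) (i : Int), i = (r : Int) + 1 → j ≤ fuel → j ≤ r + 1 →
      (1 ≤ j → c = pvZc cs r (j - 1)) →
      pvWhileA (cs.length : Int) (pvPreA cs) i fuel (j : Int) (c : Int) res
        = res + ((List.range j).countP (fun a => pvVB cs r a) : Int) := by
  have hpre := (pvPreA_spec cs).2
  intro fuel
  induction fuel with
  | zero =>
      intro j c res i hi hjf hjr hinv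
      have hj : j = 0 := by omega
      subst hj
      simp [pvWhileA]
  | succ f ih =>
      intro j c res i hi hjf hjr hinv
      subst hi
      rcases Nat.eq_zero_or_pos j with hj0 | hj1
      · subst hj0
        simp only [pvWhileA, Nat.cast_zero]
        rw [if_neg (by intro h; exact lt_irrefl 0 h.1)]
        simp
      · have hc : c = pvZc cs r (j - 1) := hinv hj1
        by_cases hcut : (c : Int) * c ≤ (cs.length : Int)
        · have hjpos : (0 : Int) < (j : Int) := by exact_mod_cast hj1
          have hjlen : j ≤ cs.length := by omega
          have hp : PySem.List.pyGetD (pvPreA cs) (j : Int) (-1) = (pvPf cs j : Int) := by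
            rw [PySem.List.pyGetD_natCast]
            exact hpre j hj1 hjlen
          set P := pvPf cs j with hPdef
          have hj1' : j - 1 + 1 = j := by omega
          have hPle : P ≤ j - 1 := by
            have := pvPf_le cs (j - 1); rwa [hj1'] at this
          have hblock : ∀ q, P ≤ q → q < j - 1 → cs.getD q ' ' ≠ '0' := by
            intro q h1 h2
            refine pvPf_block cs (j - 1) q ?_ h2
            rw [hj1']
            exact h1
          have hPchar : P = 0 ∨ cs.getD (P - 1) ' ' = '0' := by
            have := pvPf_zero_char cs (j - 1)
            rwa [hj1'] at this
          have hconst : ∀ a, P ≤ a → a ≤ j - 1 → pvZc cs r a = c := by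
            intro a h1 h2
            rw [hc]
            have := pvZc_const cs r ((j - 1) - a) a
              (fun q hq1 hq2 => hblock q (by omega) (by omega)) (by omega)
            rw [this]
            congr 1
            omega
          have hnext : 1 ≤ P → (c + 1 : Nat) = pvZc cs r (P - 1) := by
            intro hP1
            rcases hPchar with h0 | hch
            · omega
            · rw [pvZc_succ cs r (P - 1) (by omega), if_pos hch,
                show P - 1 + 1 = P by omega, hconst P le_rfl hPle]
              omega
          have hsplit : (List.range j).countP (fun a => pvVB cs r a)
              = (List.range P).countP (fun a => pvVB cs r a)
                + min (j - P) ((r + 2) - (P + c * c + c)) := by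
            conv_lhs => rw [show j = P + (j - P) by omega]
            rw [List.range_add, List.countP_append]
            congr 1
            rw [List.countP_map]
            have hcg : ∀ k ∈ List.range (j - P),
                ((fun a => pvVB cs r a) ∘ (fun x => P + x)) k = true
                  ↔ (fun k => decide (k < (r + 2) - (P + c * c + c))) k = true := by
              intro k hk
              have hk' : k < j - P := List.mem_range.mp hk
              have ha : P + k ≤ r := by omega
              simp only [Function.comp]
              unfold pvVB
              rw [hconst (P + k) (by omega) (by omega)]
              rw [decide_eq_true_eq, decide_eq_true_eq]
              generalize c * c = w
              omega
            rw [List.countP_congr hcg, pvCountRangeLt]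
          simp only [pvWhileA]
          rw [if_pos ⟨hjpos, hcut⟩]
          simp only [hp]
          rw [show ((c : Int) + 1) = ((c + 1 : Nat) : Int) by push_cast; ring]
          rw [ih P (c + 1) _ ((r : Int) + 1) rfl (by omega) (by omega) hnext]
          rw [hsplit]
          rw [show ((c : Int) * (c : Int)) = ((c * c : Nat) : Int) by push_cast; ring]
          generalize (c * c : Nat) = w
          split_ifs with hcase <;> push_cast <;> omega
        · simp only [pvWhileA]
          rw [if_neg (fun hand => hcut hand.2)]
          have hz : (List.range j).countP (fun a => pvVB cs r a) = 0 := by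
            rw [List.countP_eq_zero]
            intro a ha
            have haj : a < j := List.mem_range.mp ha
            have hza : c ≤ pvZc cs r a := by
              rw [hc]
              exact pvZc_anti cs r a (j - 1) (by omega)
            have hcut' : cs.length < c * c := by
              rcases Nat.lt_or_ge cs.length (c * c) with h | h
              · exact h
              · exact absurd (by exact_mod_cast h : (c : Int) * c ≤ (cs.length : Int)) hcut
            have hmul : c * c ≤ pvZc cs r a * pvZc cs r a := Nat.mul_le_mul hza hza
            unfold pvVB
            simp only [decide_eq_true_eq]
            intro hle
            have hlen2 : r + 1 - a ≤ cs.length := by omega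
            omega
          rw [hz]
          simp

-- a fold that adds a per-element quantity is the sum of those quantities
lemma pvFoldSum (g : Nat → Int) :
    ∀ (l : List Nat) (f : Int → Nat → Int) (init : Int),
      (∀ k ∈ l, ∀ res, f res k = res + g k) → l.foldl f init = init + (l.map g).sum := by
  intro l
  induction l with
  | nil => intro f init _; simp
  | cons x xs ih =>
      intro f init h
      rw [List.foldl_cons, h x (by simp) init, ih f _ (fun k hk res => h k (by simp [hk]) res)]
      simp
      ring

lemma pvRange1 (n : Nat) :
    PySem.List.pyRange 1 ((n : Int) + 1) 1 = (List.range n).map (fun (k : Nat) => 1 + (k : Int)) := by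
  induction n with
  | zero => rw [PySem.List.pyRange_one_eq_nil (by simp)]; simp
  | succ m ih =>
      rw [show ((m + 1 : Nat) : Int) + 1 = ((m : Int) + 1) + 1 by push_cast; ring,
        PySem.List.pyRange_one_succ_right (by omega), ih, List.range_succ, List.map_append]
      simp [add_comm]

lemma pvRange0 (n : Nat) :
    PySem.List.pyRange 0 (n : Int) 1 = (List.range n).map (fun k => ((k : Nat) : Int)) := by
  induction n with
  | zero => rw [PySem.List.pyRange_one_eq_nil (by simp)]; simp
  | succ m ih =>
      rw [show ((m + 1 : Nat) : Int) = ((m : Nat) : Int) + 1 by push_cast; ring,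
        PySem.List.pyRange_one_succ_right (by omega), ih, List.range_succ, List.map_append]
      simp

-- A as a sum of per-endpoint counts
lemma pvA_eq_sum (s : String) :
    numberOfSubstringsV2 s
      = ((List.range s.toList.length).map (fun r => (pvC s.toList r : Int))).sum := by
  unfold numberOfSubstringsV2
  simp only []
  rw [pvRange1, List.foldl_map]
  refine (pvFoldSum _ _ _ 0 ?_).trans (zero_add _)
  intro k hk res
  have hkn : k < s.toList.length := List.mem_range.mp hk
  try dsimp only
  rw [show (1 : Int) + (k : Int) - 1 = ((k : Nat) : Int) by ring]
  rw [PySem.List.pyGetD_natCast]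
  rw [show (if s.toList.getD k ' ' = '0' then (1 : Int) else 0)
      = (((if s.toList.getD k ' ' = '0' then 1 else 0) : Nat) : Int) by split_ifs <;> simp]
  rw [show ((1 : Int) + (k : Int)).toNat = k + 1 by omega]
  rw [show (1 : Int) + (k : Int) = ((k + 1 : Nat) : Int) by push_cast; ring]
  rw [pvChain s.toList k hkn (k + 1) (k + 1)
      (if s.toList.getD k ' ' = '0' then 1 else 0) res ((k + 1 : Nat) : Int)
      (by push_cast; ring) le_rfl le_rfl ?_]
  · rfl
  · intro _
    rw [show k + 1 - 1 = k from rfl, pvZc_succ s.toList k k le_rfl,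
      pvZc_stop s.toList k (k + 1) (by omega)]
    simp

-- B's inner backward scan counts valid left endpoints
lemma pvInnerB (cs : List Char) (r : Nat) (_hr : r < cs.length) :
    ∀ a, a ≤ r → ∀ (z0 : Int) (res : Int), z0 = (pvZc cs r (a + 1) : Int) →
      (PySem.List.pyRange (a : Int) (-1) (-1)).foldl
        (fun (st : Int × Int) l =>
          let z := if PySem.List.pyGetD cs l ' ' = '0' then st.1 + 1 else st.1
          if z * z ≤ ((r : Int) - l + 1) - z then (z, st.2 + 1) else (z, st.2))
        (z0, res)
      = ((pvZc cs r 0 : Int), res + (((List.range (a + 1)).countP (fun a' => pvVB cs r a')) : Int)) := by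
  intro a
  induction a with
  | zero =>
      intro _ z0 res hz0
      rw [PySem.List.pyRange_neg_one_cons (by simp : (-1 : Int) < ((0 : Nat) : Int)),
        show ((0 : Nat) : Int) - 1 = -1 by simp, PySem.List.pyRange_neg_one_eq_nil le_rfl]
      simp only [List.foldl_cons, List.foldl_nil, PySem.List.pyGetD_natCast]
      have hz : (if cs.getD 0 ' ' = '0' then z0 + 1 else z0) = (pvZc cs r 0 : Int) := by
        rw [hz0, pvZc_succ cs r 0 (by omega)]
        split_ifs <;> push_cast <;> ring
      rw [hz, List.range_one, List.countP_singleton]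
      have hiff : (fun a' => pvVB cs r a') 0 = true
          ↔ (pvZc cs r 0 : Int) * (pvZc cs r 0) ≤ ((r : Int) - ((0 : Nat) : Int) + 1) - (pvZc cs r 0) := by
        simp only []
        rw [pvVB_int cs r 0 (by omega)]
        exact decide_eq_true_iff
      split_ifs with h1 h2 h3
      · simp
      · exact absurd (hiff.mpr h1) h2
      · exact absurd (hiff.mp h3) h1
      · simp
  | succ m ih =>
      intro hm z0 res hz0
      rw [PySem.List.pyRange_neg_one_cons (by push_cast; omega : (-1 : Int) < ((m + 1 : Nat) : Int)),
        show ((m + 1 : Nat) : Int) - 1 = ((m : Nat) : Int) by push_cast; ring]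
      simp only [List.foldl_cons, PySem.List.pyGetD_natCast]
      have hz : (if cs.getD (m + 1) ' ' = '0' then z0 + 1 else z0) = (pvZc cs r (m + 1) : Int) := by
        rw [hz0, pvZc_succ cs r (m + 1) hm]
        split_ifs <;> push_cast <;> ring
      rw [hz]
      have hvb : pvVB cs r (m + 1)
          = decide ((pvZc cs r (m + 1) : Int) * (pvZc cs r (m + 1))
              ≤ ((r : Int) - ((m + 1 : Nat) : Int) + 1) - (pvZc cs r (m + 1))) :=
        pvVB_int cs r (m + 1) hm
      have hstep : (List.range (m + 1 + 1)).countP (fun a' => pvVB cs r a')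
          = (List.range (m + 1)).countP (fun a' => pvVB cs r a')
            + (if pvVB cs r (m + 1) then 1 else 0) := by
        rw [List.range_succ, List.countP_append]
        simp [List.countP_cons]
      split_ifs with h
      · rw [ih (by omega) _ (res + 1) rfl, hstep,
          if_pos (by rw [hvb]; exact decide_eq_true h)]
        rw [Prod.mk.injEq]
        refine ⟨rfl, ?_⟩
        push_cast
        ring
      · rw [ih (by omega) _ res rfl, hstep,
          if_neg (by rw [hvb]; simp only [decide_eq_true_eq]; exact h)]
        simp

-- B as the same sum
lemma pvB_eq_sum (s : String) :
    numberOfSubstringsV2_alt s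
      = ((List.range s.toList.length).map (fun r => (pvC s.toList r : Int))).sum := by
  unfold numberOfSubstringsV2_alt
  simp only []
  rw [pvRange0, List.foldl_map]
  refine (pvFoldSum _ _ _ 0 ?_).trans (zero_add _)
  intro r hrk res
  have hrn : r < s.toList.length := List.mem_range.mp hrk
  try dsimp only
  rw [pvInnerB s.toList r hrn r le_rfl 0 res
    (by rw [pvZc_stop s.toList r (r + 1) (by omega)]; simp)]
  rfl

-- ===== VERDICT (by name: the statement is the Claim_ definition above) =====
theorem numberOfSubstringsV2_spec : Claim_equal_numberOfSubstringsV2 := by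
  intro s _
  unfold Spec_numberOfSubstringsV2
  rw [pvA_eq_sum, pvB_eq_sum]
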